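-- pv_equiv track=rewrite | github.com/khoajedi/codesignal | arcade/intro/avoidObstacles.py | solution
-- ===== SOURCE A (Python) =====
-- def solution(inputArray):
--     stride = 2
--     coor = stride
--     dest = max(inputArray)
--
--     while coor <= dest:
--         if coor in inputArray:
--             stride += 1
--             coor = stride
--             continue
--         coor += stride
--
--     return stride
-- ===== SOURCE B (Python) =====
-- def solution(inputArray):
--     # Smallest stride >= 2 such that no obstacle is a positive multiple of it.
--     stride = 2
--     while any(x > 0 and x % stride == 0 for x in inputArray):
--         stride += 1
--     return stride
-- ===== Notes on version B (the rewrite author's own statement) =====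
-- stated objective: faster
-- what changed: Replaces A's coordinate-walking simulation up to max(inputArray) (with an O(n) membership scan at every visited coordinate) by a single divisibility scan over the elements per candidate stride: stride is the first integer >= 2 that divides no positive obstacle.
import Mathlib
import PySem

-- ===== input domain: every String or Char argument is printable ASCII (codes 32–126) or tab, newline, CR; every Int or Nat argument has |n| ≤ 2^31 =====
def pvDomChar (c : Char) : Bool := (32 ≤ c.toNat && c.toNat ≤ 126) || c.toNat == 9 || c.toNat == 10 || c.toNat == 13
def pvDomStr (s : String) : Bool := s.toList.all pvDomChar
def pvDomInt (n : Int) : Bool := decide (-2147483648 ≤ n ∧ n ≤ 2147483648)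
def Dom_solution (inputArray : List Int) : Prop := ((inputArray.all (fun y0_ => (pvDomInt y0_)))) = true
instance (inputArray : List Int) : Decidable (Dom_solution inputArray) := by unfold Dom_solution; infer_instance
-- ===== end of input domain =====

-- B replaces A's coordinate-walking simulation with a divisibility scan; same result (return value only).

-- ===== PORT A =====
-- A's while-loop over state (stride, coor); the two Prop arguments are loop
-- invariants of the Python loop, carried only for termination.
def solutionLoop (inputArray : List Int) (dest stride coor : Int)
    (h1 : 2 ≤ stride) (h2 : stride ≤ coor) : Int :=
  if h : coor ≤ dest then
    if inputArray.contains coor then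
      solutionLoop inputArray dest (stride + 1) (stride + 1) (by omega) (by omega)
    else
      solutionLoop inputArray dest stride (coor + stride) h1 (by omega)
  else
    stride
termination_by ((dest + 1 - stride).toNat, (dest + 1 - coor).toNat)
decreasing_by
  · exact Prod.Lex.left _ _ (by omega)
  · exact Prod.Lex.right _ (by omega)

def solution (inputArray : List Int) : Int :=
  match hm : PySem.List.max? inputArray (fun x => x) with
  | some dest => solutionLoop inputArray dest 2 2 (by omega) (by omega)
  | none => 0   -- unreachable under Pre_: max([]) raises ValueError

-- ===== PORT B =====
-- maxPos bounds the loop for termination only: any positive multiple of stride is ≥ stride.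
def solutionAltLoop (inputArray : List Int) (stride : Int) (h1 : 2 ≤ stride) : Int :=
  if inputArray.any (fun x => decide (0 < x) && decide (PySem.Int.mod x stride = 0)) then
    solutionAltLoop inputArray (stride + 1) (by omega)
  else
    stride
termination_by ((inputArray.foldl max 0) + 1 - stride).toNat
decreasing_by
  rename_i hany
  simp only [List.any_eq_true, Bool.and_eq_true, decide_eq_true_eq] at hany
  obtain ⟨x, hx, hpos, hmod⟩ := hany
  have hdvd : stride ∣ x := by
    have := (PySem.Int.mod_eq_zero_iff_dvd x stride).mp hmod
    exact this
  have hsx : stride ≤ x := Int.le_of_dvd hpos hdvd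
  have hmax := PySem.List.le_foldl_max inputArray (0 : Int)
  have := hmax.2 x hx
  omega

def solution_alt (inputArray : List Int) : Int :=
  solutionAltLoop inputArray 2 (by omega)

-- ===== PRECONDITION & SPEC =====
-- Pre_ excludes only the empty list, on which A raises ValueError (max of empty sequence).
def Pre_solution (inputArray : List Int) : Prop := inputArray ≠ []
instance (inputArray : List Int) : Decidable (Pre_solution inputArray) := by unfold Pre_solution; infer_instance
def pvWitness_solution : List Int := [5]

def Spec_solution (inputArray : List Int) (out : Int) : Prop := out = solution_alt inputArray
instance (inputArray : List Int) (out : Int) : Decidable (Spec_solution inputArray out) := by unfold Spec_solution; infer_instance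

-- ===== CLAIM (what is proved, stated in full; the proofs are below) =====
def Claim_equal_solution : Prop := ∀ (inputArray : List Int), Dom_solution inputArray → Pre_solution inputArray → Spec_solution inputArray (solution inputArray)

-- ===== LEMMAS AND PROOFS =====

-- One unfolding step of B's loop.
theorem solutionAltLoop_step (arr : List Int) (stride : Int) (h1 : 2 ≤ stride) :
    solutionAltLoop arr stride h1 =
      if arr.any (fun x => decide (0 < x) && decide (PySem.Int.mod x stride = 0)) then
        solutionAltLoop arr (stride + 1) (by omega)
      else stride := by
  rw [solutionAltLoop]

-- Main correspondence: A's walk from a multiple `coor` of `stride` equals B's scan,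
-- provided every obstacle is ≤ dest and every positive multiple of stride in arr is ≥ coor.
theorem loop_eq (arr : List Int) (dest stride coor : Int)
    (h1 : 2 ≤ stride) (h2 : stride ≤ coor)
    (hd : ∀ x ∈ arr, x ≤ dest)
    (hm : stride ∣ coor)
    (hprev : ∀ x ∈ arr, 0 < x → stride ∣ x → coor ≤ x) :
    solutionLoop arr dest stride coor h1 h2 = solutionAltLoop arr stride h1 := by
  rw [solutionLoop]
  split
  · rename_i hle
    split
    · rename_i hin
      have hcin : coor ∈ arr := by
        simpa using hin
      have hQ : arr.any (fun x => decide (0 < x) && decide (PySem.Int.mod x stride = 0)) = true := by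
        simp only [List.any_eq_true, Bool.and_eq_true, decide_eq_true_eq]
        exact ⟨coor, hcin, by omega, (PySem.Int.mod_eq_zero_iff_dvd coor stride).mpr hm⟩
      rw [solutionAltLoop_step, if_pos hQ]
      exact loop_eq arr dest (stride + 1) (stride + 1) (by omega) (by omega) hd
        ⟨1, by ring⟩
        (fun x hx hpos hdvd => Int.le_of_dvd hpos hdvd)
    · rename_i hnin
      have hcnin : coor ∉ arr := by
        simpa using hnin
      refine loop_eq arr dest stride (coor + stride) h1 (by omega) hd
        (by exact Dvd.dvd.add hm dvd_rfl) ?_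
      intro x hx hpos hdvd
      have hcx : coor ≤ x := hprev x hx hpos hdvd
      have hxne : x ≠ coor := fun h => hcnin (h ▸ hx)
      have hdd : stride ∣ (x - coor) := Dvd.dvd.sub hdvd hm
      have : stride ≤ x - coor := Int.le_of_dvd (by omega) hdd
      omega
  · rename_i hgt
    rw [solutionAltLoop_step]
    have hQ : arr.any (fun x => decide (0 < x) && decide (PySem.Int.mod x stride = 0)) = false := by
      simp only [List.any_eq_false, Bool.and_eq_true, decide_eq_true_eq, not_and]
      intro x hx hpos hmod
      have hdvd := (PySem.Int.mod_eq_zero_iff_dvd x stride).mp hmod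
      have := hprev x hx hpos hdvd
      have := hd x hx
      omega
    rw [if_neg (by simp [hQ])]
termination_by ((dest + 1 - stride).toNat, (dest + 1 - coor).toNat)
decreasing_by
  all_goals simp_wf
  all_goals first
    | exact Prod.Lex.right _ (by omega)
    | exact Prod.Lex.left _ _ (by omega)

-- ===== VERDICT (by name: the statement is the Claim_ definition above) =====
theorem solution_spec : Claim_equal_solution := by
  intro arr _ hpre
  unfold Spec_solution solution
  split
  · rename_i dest hm
    have hd : ∀ x ∈ arr, x ≤ dest := PySem.List.max?_isMax hm
    unfold solution_alt
    exact loop_eq arr dest 2 2 (by omega) (by omega) hd dvd_rfl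
      (fun x hx hpos hdvd => Int.le_of_dvd hpos hdvd)
  · rename_i hm
    exact absurd (Iff.mp (PySem.List.max?_eq_none_iff _ _) hm) hpre
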